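-- pv_equiv track=rewrite | github.com/vcherel/unlimited-pedantix | src/text_utils.py | words_match
-- ===== SOURCE A (Python) =====
-- import unicodedata
--
-- def normalize_word(word: str) -> str:
--     word = word.lower().strip()
--     return ''.join(c for c in unicodedata.normalize('NFD', word) if unicodedata.category(c) != 'Mn')
--
-- def words_match(guess, target) -> bool:
--     guess_norm, target_norm = normalize_word(guess), normalize_word(target)
--     if guess_norm == target_norm:
--         return True
--     # Simple plural handling
--     for suffix in ['s', 'es', 'x']:
--         if guess_norm.endswith(suffix) and guess_norm[:-len(suffix)] == target_norm:
--             return True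
--         if target_norm.endswith(suffix) and target_norm[:-len(suffix)] == guess_norm:
--             return True
--     return False
-- ===== SOURCE B (Python) =====
-- import unicodedata
--
-- def normalize_word(word: str) -> str:
--     word = word.lower().strip()
--     return ''.join(c for c in unicodedata.normalize('NFD', word) if unicodedata.category(c) != 'Mn')
--
-- def words_match(guess, target) -> bool:
--     # Single simultaneous scan: advance over the common prefix of the two
--     # normalized words; a match means one word ends exactly there and the
--     # other's leftover tail is empty or one of the plural endings.
--     a, b = normalize_word(guess), normalize_word(target)
--     i = 0
--     while i < len(a) and i < len(b) and a[i] == b[i]: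
--         i += 1
--     if i < len(a) and i < len(b):
--         return False
--     rest = a[i:] if i < len(a) else b[i:]
--     return rest in ('', 's', 'es', 'x')
-- ===== Notes on version B (the rewrite author's own statement) =====
-- stated objective: alternative
-- what changed: Replaced A's staged suffix loop (three endswith + negative-slice + full equality tests in each direction) by a single simultaneous two-pointer scan over the two normalized words that advances past the common prefix and then classifies the one leftover tail.
import Mathlib
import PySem

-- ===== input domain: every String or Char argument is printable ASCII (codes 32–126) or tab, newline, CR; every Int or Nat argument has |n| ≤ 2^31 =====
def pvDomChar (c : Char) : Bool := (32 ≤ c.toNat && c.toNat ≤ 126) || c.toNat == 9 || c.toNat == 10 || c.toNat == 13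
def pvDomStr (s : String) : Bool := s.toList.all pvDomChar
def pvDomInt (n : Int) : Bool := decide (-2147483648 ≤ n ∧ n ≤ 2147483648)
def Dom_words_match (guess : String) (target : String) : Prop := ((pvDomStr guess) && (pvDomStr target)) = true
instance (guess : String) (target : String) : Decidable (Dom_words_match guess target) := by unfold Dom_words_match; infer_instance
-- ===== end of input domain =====

-- B replaces A's plural-suffix loop (three endswith + negative-slice equality tests in
-- each direction) by a single simultaneous two-pointer scan over the two normalized
-- words that skips the common prefix and classifies the leftover tail; objective: alternative.

-- ===== PORT A =====
-- normalize_word: on the ASCII domain the NFD normalization is the identity and no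
-- character has category 'Mn', so normalize_word is exactly lower().strip() there.
def pvNormalize (w : String) : String := PySem.Str.strip (PySem.Str.lower w)

-- the 'for suffix in ['s', 'es', 'x']' loop of A, as structural recursion over the list
def pvLoopA (g t : String) : List String → Bool
  | [] => false
  | suf :: rest =>
    if PySem.Str.endswith g suf && (PySem.Str.slice g none (some (-(PySem.Str.len suf : Int))) == t) then true
    else if PySem.Str.endswith t suf && (PySem.Str.slice t none (some (-(PySem.Str.len suf : Int))) == g) then true
    else pvLoopA g t rest

def words_match (guess : String) (target : String) : Bool :=
  let guess_norm := pvNormalize guess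
  let target_norm := pvNormalize target
  if guess_norm == target_norm then true
  else pvLoopA guess_norm target_norm ["s", "es", "x"]

-- ===== PORT B =====
-- "rest in ('', 's', 'es', 'x')" on the leftover tail (as a list of chars)
def pvTail (l : List Char) : Bool := l == [] || l == ['s'] || l == ['e','s'] || l == ['x']

-- the while-loop of Source B: walk both words in lockstep, then judge the leftover tail
def pvScan : List Char → List Char → Bool
  | [], ys => pvTail ys
  | xs, [] => pvTail xs
  | x :: xs, y :: ys => x == y && pvScan xs ys

def words_match_alt (guess : String) (target : String) : Bool :=
  let a := pvNormalize guess
  let b := pvNormalize target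
  pvScan a.toList b.toList

-- ===== PRECONDITION & SPEC =====
def Spec_words_match (guess : String) (target : String) (out : Bool) : Prop := out = words_match_alt guess target
instance (guess : String) (target : String) (out : Bool) : Decidable (Spec_words_match guess target out) := by unfold Spec_words_match; infer_instance

-- ===== CLAIM (what is proved, stated in full; the proofs are below) =====
def Claim_equal_words_match : Prop := ∀ (guess : String) (target : String), Dom_words_match guess target → Spec_words_match guess target (words_match guess target)

-- ===== LEMMAS AND PROOFS =====

-- 'k is a suffix of a and a without its last |k| chars is b' says exactly 'a = b ++ k'
lemma pv_take_char (la lb lk : List Char) :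
    (lk <:+ la ∧ la.take (la.length - lk.length) = lb) ↔ la = lb ++ lk := by
  constructor
  · rintro ⟨⟨p, rfl⟩, h⟩
    simp_all
  · rintro rfl
    simp

-- one iteration test of A's loop, characterized
lemma pv_end (a b k : String) (hk : 0 < k.toList.length) :
    (PySem.Str.endswith a k && (PySem.Str.slice a none (some (-(PySem.Str.len k : Int))) == b)) = true
      ↔ a.toList = b.toList ++ k.toList := by
  rw [← pv_take_char]
  simp only [PySem.Str.endswith_eq, Bool.and_eq_true, beq_iff_eq, PySem.Chars.endswith_iff,
    String.ext_iff, PySem.Str.toList_slice, PySem.Chars.slice_eq_listSlice, PySem.Str.len_eq,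
    PySem.List.slice_to_neg_natCast _ _ hk]

-- B's lockstep scan, characterized: it succeeds exactly when the words are equal or
-- differ by one plural ending
lemma pv_scan (xs ys : List Char) :
    pvScan xs ys = true ↔
      (xs = ys ∨ xs = ys ++ ['s'] ∨ xs = ys ++ ['e','s'] ∨ xs = ys ++ ['x']
        ∨ ys = xs ++ ['s'] ∨ ys = xs ++ ['e','s'] ∨ ys = xs ++ ['x']) := by
  induction xs generalizing ys with
  | nil =>
    cases ys <;> (simp [pvScan, pvTail]; try tauto)
  | cons x xs ih =>
    cases ys with
    | nil => (simp [pvScan, pvTail]; try tauto)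
    | cons y ys =>
      simp only [pvScan, Bool.and_eq_true, beq_iff_eq, ih, List.cons_append,
        List.cons.injEq]
      constructor
      · rintro ⟨rfl, h⟩; tauto
      · rintro (⟨rfl, h⟩ | ⟨rfl, h⟩ | ⟨rfl, h⟩ | ⟨rfl, h⟩ | ⟨rfl, h⟩ | ⟨rfl, h⟩ | ⟨rfl, h⟩) <;>
          exact ⟨rfl, by tauto⟩

-- the two bodies agree for ARBITRARY strings a b (here: the normalized forms)
lemma pv_core (a b : String) :
    (if a == b then true else pvLoopA a b ["s", "es", "x"]) = pvScan a.toList b.toList := by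
  rw [Bool.eq_iff_iff, pv_scan]
  by_cases hab : a = b
  · simp [hab]
  · have hab' : (a == b) = false := by simp [hab]
    have hne : a.toList ≠ b.toList := fun h => hab (String.ext h)
    simp only [hab', Bool.false_eq_true, if_false, pvLoopA, Bool.if_true_left,
      Bool.or_eq_true]
    simp only [decide_eq_true_eq,
      pv_end a b "s" (by decide), pv_end b a "s" (by decide),
      pv_end a b "es" (by decide), pv_end b a "es" (by decide),
      pv_end a b "x" (by decide), pv_end b a "x" (by decide), or_false]
    have : "s".toList = ['s'] := by decide
    have : "es".toList = ['e','s'] := by decide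
    have : "x".toList = ['x'] := by decide
    simp_all
    tauto

theorem pv_main (guess target : String) : words_match guess target = words_match_alt guess target := by
  unfold words_match words_match_alt
  exact pv_core (pvNormalize guess) (pvNormalize target)

-- ===== VERDICT (by name: the statement is the Claim_ definition above) =====
theorem words_match_spec : Claim_equal_words_match := by
  intro guess target _
  unfold Spec_words_match
  exact pv_main guess target
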